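-- pv_equiv track=rewrite | github.com/fantasy-08/puzzels | XXX/eng.py | maxaa
-- ===== SOURCE A (Python) =====
-- def maxaa(l,vis):
--     ans=0
--     ii=-1
--     for i in range(len(l)):
--         if(vis[i]==0):
--             ii=i
--             break
--     if(ii==-1):return 0
--     for i in range(0,len(l)):
--         if(i!=ii and vis[i]==0):
--             vis[ii],vis[i]=1,1
--             ans=max(ans,score(l[ii],l[i])+maxaa(l,vis))
--             vis[ii],vis[i]=0,0
--     return ans
--
-- def score(a,b):
--     i=0
--     ans,ans2=0,0
--     while i<min(len(a),len(b)):
--         if(a[i]==b[i]): ans+=1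
--         else: break
--         i+=1
--     a2=a[::-1]
--     b2=b[::-1]
--     i=0
--     while i<min(len(a2),len(b2)):
--         if(a2[i]==b2[i]): ans2+=1
--         else: break
--         i+=1
--     return min(ans,ans2)**2
-- ===== SOURCE B (Python) =====
-- def maxaa(l, vis):
--     free = [l[i] for i in range(len(l)) if vis[i] == 0]
--     n = len(free)
--     memo = {}
--
--     def solve(mask):
--         if mask in memo:
--             return memo[mask]
--         i = 0
--         while i < n and not ((mask >> i) & 1):
--             i += 1
--         if i >= n:
--             return 0
--         best = 0
--         for j in range(i + 1, n):
--             if (mask >> j) & 1: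
--                 best = max(best, _score(free[i], free[j]) + solve(mask ^ (1 << i) ^ (1 << j)))
--         memo[mask] = best
--         return best
--
--     return solve((1 << n) - 1)
--
--
-- def _score(a, b):
--     p = 0
--     for x, y in zip(a, b):
--         if x != y:
--             break
--         p += 1
--     s = 0
--     for x, y in zip(reversed(a), reversed(b)):
--         if x != y:
--             break
--         s += 1
--     return min(p, s) ** 2
-- ===== Notes on version B (the rewrite author's own statement) =====
-- stated objective: alternative
-- what changed: A's recursive search that mutates and restores the vis array is replaced by a memoized bitmask dynamic program over the set of unvisited strings (extracted once), so every subset of strings is solved at most once.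
import Mathlib
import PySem

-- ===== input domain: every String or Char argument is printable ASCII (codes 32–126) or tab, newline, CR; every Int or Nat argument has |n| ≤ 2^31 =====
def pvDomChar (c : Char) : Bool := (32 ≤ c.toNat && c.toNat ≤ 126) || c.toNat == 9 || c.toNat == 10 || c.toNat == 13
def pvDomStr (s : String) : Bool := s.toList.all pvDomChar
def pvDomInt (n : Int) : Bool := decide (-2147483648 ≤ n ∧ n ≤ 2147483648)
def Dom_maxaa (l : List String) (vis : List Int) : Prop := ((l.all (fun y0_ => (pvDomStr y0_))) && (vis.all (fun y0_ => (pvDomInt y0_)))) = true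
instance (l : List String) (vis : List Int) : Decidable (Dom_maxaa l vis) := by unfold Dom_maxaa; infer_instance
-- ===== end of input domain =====

-- B replaces A's recursive search (which mutates and restores `vis`) by a memoized
-- bitmask DP over the unvisited strings, solving each subset at most once (objective: alternative).
-- A restores `vis` before returning, so the net mutation is nil; equivalence is about the return value.

-- ===== PORT A =====
-- first while loop of score: i, ans over a[i]==b[i]
def pvScoreLoopA (x y : List Char) (i : Nat) (ans : Int) : Int :=
  if i < min x.length y.length then
    (if x.getD i ' ' == y.getD i ' ' then pvScoreLoopA x y (i + 1) (ans + 1) else ans)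
  else ans
termination_by min x.length y.length - i
decreasing_by omega

def pvScoreA (a b : String) : Int :=
  let ans := pvScoreLoopA a.toList b.toList 0 0
  let ans2 := pvScoreLoopA a.toList.reverse b.toList.reverse 0 0
  (min ans ans2) ^ 2

-- the first for-loop with break: ii = first free index, else -1
def pvFindFreeA (l : List String) (vis : List Int) (i : Nat) : Int :=
  if i < l.length then
    (if vis.getD i 0 == 0 then (i : Int) else pvFindFreeA l vis (i + 1))
  else -1
termination_by l.length - i
decreasing_by omega

mutual
def pvMaxaaGo : Nat → List String → List Int → Int
  | 0, _, _ => 0                                 -- fuel guard only; never reached (depth ≤ free count ≤ |l|)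
  | fuel + 1, l, vis =>
    let ii := pvFindFreeA l vis 0
    if ii == -1 then 0
    else pvLoopA fuel l vis ii.toNat 0 0
  termination_by fuel _ _ => (fuel, 0, 0)

def pvLoopA (fuel : Nat) (l : List String) (vis : List Int) (ii i : Nat) (ans : Int) : Int :=
  if i < l.length then
    (if (!(i == ii) && (vis.getD i 0 == 0)) then
      pvLoopA fuel l vis ii (i + 1)
        (max ans (pvScoreA (l.getD ii "") (l.getD i "") + pvMaxaaGo fuel l ((vis.set ii 1).set i 1)))
    else pvLoopA fuel l vis ii (i + 1) ans)
  else ans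
  termination_by (fuel, 1, l.length - i)
end

def maxaa (l : List String) (vis : List Int) : Int := pvMaxaaGo (l.length + 1) l vis

-- ===== PORT B =====
-- common-prefix length of a zipped pair list (the zip loops of _score)
def pvPrefB : List (Char × Char) → Int
  | [] => 0
  | (x, y) :: ps => if x == y then 1 + pvPrefB ps else 0

def pvScoreB (a b : String) : Int :=
  let p := pvPrefB (a.toList.zip b.toList)
  let s := pvPrefB (a.toList.reverse.zip b.toList.reverse)
  (min p s) ^ 2

def pvFreeB (l : List String) (vis : List Int) : List String :=
  (List.range l.length).filterMap (fun i => if vis.getD i 0 == 0 then some (l.getD i "") else none)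

-- while i < n and not ((mask >> i) & 1): i += 1
def pvLowBitB (n : Nat) (mask : Nat) (i : Nat) : Nat :=
  if i < n && !(mask.testBit i) then pvLowBitB n mask (i + 1) else i
termination_by n - i
decreasing_by simp_all; omega

mutual
def pvSolveB (free : List String) : Nat → Nat → PySem.Dict Nat Int → Int × PySem.Dict Nat Int
  | 0, _, memo => (0, memo)                      -- fuel guard only; never reached (depth ≤ |free|)
  | fuel + 1, mask, memo =>
    match memo.get? mask with
    | some v => (v, memo)
    | none =>
      let n := free.length
      let i := pvLowBitB n mask 0
      if n ≤ i then (0, memo)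
      else
        let r := pvLoopB free fuel mask i (i + 1) 0 memo
        (r.1, r.2.insert mask r.1)
  termination_by fuel _ _ => (fuel, 0, 0)

def pvLoopB (free : List String) (fuel : Nat) (mask : Nat) (i j : Nat) (best : Int)
    (memo : PySem.Dict Nat Int) : Int × PySem.Dict Nat Int :=
  if j < free.length then
    (if mask.testBit j then
      let r := pvSolveB free fuel (mask ^^^ (1 <<< i) ^^^ (1 <<< j)) memo
      pvLoopB free fuel mask i (j + 1)
        (max best (pvScoreB (free.getD i "") (free.getD j "") + r.1)) r.2
    else pvLoopB free fuel mask i (j + 1) best memo)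
  else (best, memo)
  termination_by (fuel, 1, free.length - j)
end

def maxaa_alt (l : List String) (vis : List Int) : Int :=
  let free := pvFreeB l vis
  (pvSolveB free (free.length + 1) (2 ^ free.length - 1) PySem.Dict.empty).1

-- ===== PRECONDITION & SPEC =====
-- Pre_ excludes exactly the inputs with len(vis) < len(l), on which Python A raises IndexError
-- (vis[i] in its scan over range(len(l))); B raises there too.
def Pre_maxaa (l : List String) (vis : List Int) : Prop := l.length ≤ vis.length
instance (l : List String) (vis : List Int) : Decidable (Pre_maxaa l vis) := by
  unfold Pre_maxaa; infer_instance

def pvWitness_maxaa : List String × List Int := (["ab", "ba"], [0, 0])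

def Spec_maxaa (l : List String) (vis : List Int) (out : Int) : Prop := out = maxaa_alt l vis
instance (l : List String) (vis : List Int) (out : Int) : Decidable (Spec_maxaa l vis out) := by
  unfold Spec_maxaa; infer_instance

-- ===== CLAIM (what is proved, stated in full; the proofs are below) =====
def Claim_equal_maxaa : Prop := ∀ (l : List String) (vis : List Int), Dom_maxaa l vis → Pre_maxaa l vis → Spec_maxaa l vis (maxaa l vis)

-- ===== LEMMAS AND PROOFS =====

-- the common mathematical value: max total score over matchings of a list of strings
def pvMsp : List String → Int
  | [] => 0
  | a :: rest =>
    (List.range rest.length).attach.foldl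
      (fun best j => max best (pvScoreB a (rest.getD j.1 "") + pvMsp (rest.eraseIdx j.1))) 0
termination_by xs => xs.length
decreasing_by
  simp only [List.length_cons]
  have : (rest.eraseIdx j.1).length ≤ rest.length := List.length_eraseIdx_le ..
  omega

def pvFreeIdx (l : List String) (vis : List Int) : List Nat :=
  (List.range l.length).filter (fun i => vis.getD i 0 == 0)

def pvPos (n mask : Nat) : List Nat := (List.range n).filter (fun i => mask.testBit i)

def pvInv (free : List String) (memo : PySem.Dict Nat Int) : Prop :=
  ∀ m v, memo.get? m = some v → v = pvMsp ((pvPos free.length m).map (fun i => free.getD i ""))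

theorem pvMsp_nil : pvMsp [] = 0 := by simp [pvMsp]

theorem pvMsp_cons (a : String) (rest : List String) :
    pvMsp (a :: rest) =
      (List.range rest.length).foldl
        (fun best j => max best (pvScoreB a (rest.getD j "") + pvMsp (rest.eraseIdx j))) 0 := by
  rw [pvMsp]
  exact List.foldl_attach
    (f := fun best j => max best (pvScoreB a (rest.getD j "") + pvMsp (rest.eraseIdx j)))

-- generic fold congruence on members
theorem pv_foldl_congr {α β : Type} (xs : List α) (f g : β → α → β) (b : β)
    (h : ∀ b' x, x ∈ xs → f b' x = g b' x) : xs.foldl f b = xs.foldl g b := by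
  induction xs generalizing b with
  | nil => rfl
  | cons x xs ih =>
      simp only [List.foldl_cons]
      rw [h b x (List.mem_cons_self ..)]
      exact ih _ fun b' y hy => h b' y (List.mem_cons_of_mem _ hy)

-- fold over a list = fold over its index range
theorem pv_foldl_index {α β : Type} (xs : List α) (d : α) (g : β → α → β) :
    ∀ b : β, xs.foldl g b = (List.range xs.length).foldl (fun acc j => g acc (xs.getD j d)) b := by
  induction xs with
  | nil => intro b; rfl
  | cons x xs ih =>
      intro b
      simp only [List.foldl_cons, List.length_cons, List.range_succ_eq_map,
        List.foldl_map, List.getD_cons_zero, List.getD_cons_succ]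
      exact ih (g b x)

-- score loops compute the common-prefix length
theorem pvScoreLoopA_eq (x y : List Char) :
    ∀ m i ans, min x.length y.length - i ≤ m →
      pvScoreLoopA x y i ans = ans + pvPrefB ((x.drop i).zip (y.drop i)) := by
  intro m
  induction m with
  | zero =>
      intro i ans h
      rw [pvScoreLoopA]
      have hc : ¬ (i < min x.length y.length) := by omega
      have hx : x.length ≤ i ∨ y.length ≤ i := by omega
      rw [if_neg hc]
      rcases hx with hx | hx <;> simp [List.drop_eq_nil_of_le hx, pvPrefB]
  | succ m ih =>
      intro i ans h
      rw [pvScoreLoopA]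
      by_cases hlt : i < min x.length y.length
      · have hxi : i < x.length := by omega
        have hyi : i < y.length := by omega
        rw [if_pos hlt, List.drop_eq_getElem_cons hxi, List.drop_eq_getElem_cons hyi,
          List.getD_eq_getElem x ' ' hxi, List.getD_eq_getElem y ' ' hyi]
        simp only [List.zip_cons_cons, pvPrefB, beq_iff_eq]
        by_cases he : x[i] = y[i]
        · rw [if_pos he, if_pos he, ih (i + 1) (ans + 1) (by omega)]
          ring
        · rw [if_neg he, if_neg he]
          omega
      · have hx : x.length ≤ i ∨ y.length ≤ i := by omega
        rw [if_neg hlt]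
        rcases hx with hx | hx <;> simp [List.drop_eq_nil_of_le hx, pvPrefB]

theorem pv_score_eq (a b : String) : pvScoreA a b = pvScoreB a b := by
  unfold pvScoreA pvScoreB
  rw [pvScoreLoopA_eq a.toList b.toList (min a.toList.length b.toList.length) 0 0 (by omega),
    pvScoreLoopA_eq a.toList.reverse b.toList.reverse
      (min a.toList.reverse.length b.toList.reverse.length) 0 0 (by omega)]
  simp

-- filter over a range decomposed at its head
theorem pv_filter_range'_cons (P : Nat → Bool) :
    ∀ (m a i : Nat) (tl : List Nat),
      (List.range' a m).filter P = i :: tl →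
      P i = true ∧ a ≤ i ∧ i < a + m ∧ tl = (List.range' (i + 1) (a + m - (i + 1))).filter P := by
  intro m
  induction m with
  | zero => intro a i tl h; simp at h
  | succ m ih =>
      intro a i tl h
      rw [List.range'_succ, List.filter_cons] at h
      by_cases hP : P a = true
      · simp only [hP, if_true] at h
        injection h with h1 h2
        subst h1
        subst h2
        refine ⟨hP, le_refl _, by omega, ?_⟩
        have : a + (m + 1) - (a + 1) = m := by omega
        rw [this]
      · simp only [hP] at h
        obtain ⟨h1, h2, h3, h4⟩ := ih (a + 1) i tl h
        refine ⟨h1, by omega, by omega, ?_⟩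
        have : a + 1 + m = a + (m + 1) := by omega
        rw [this] at h4
        exact h4

theorem pv_filter_ne_self {tl : List Nat} {q : Nat} (h : q ∉ tl) :
    tl.filter (fun r => !(r == q)) = tl := by
  apply List.filter_eq_self.2
  intro a ha
  simp only [Bool.not_eq_eq_eq_not, Bool.not_true, beq_eq_false_iff_ne, ne_eq]
  exact fun hq => h (hq ▸ ha)

theorem pv_filter_ne_eraseIdx : ∀ (tl : List Nat), tl.Nodup → ∀ (j : Nat) (hj : j < tl.length),
    tl.filter (fun r => !(r == tl[j])) = tl.eraseIdx j := by
  intro tl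
  induction tl with
  | nil => intro _ j hj; simp at hj
  | cons x xs ih =>
      intro hnd j hj
      have hx : x ∉ xs := (List.nodup_cons.1 hnd).1
      have hxs : xs.Nodup := (List.nodup_cons.1 hnd).2
      match j with
      | 0 =>
          simp only [List.getElem_cons_zero, List.eraseIdx_cons_zero, List.filter_cons,
            beq_self_eq_true, Bool.not_true, if_false]
          exact pv_filter_ne_self hx
      | j + 1 =>
          have hj' : j < xs.length := by simpa using hj
          have hxne : x ≠ xs[j] := fun he => hx (he ▸ xs.getElem_mem hj')
          simp only [List.getElem_cons_succ, List.eraseIdx_cons_succ, List.filter_cons]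
          rw [ih hxs j hj']
          simp [hxne]

-- CORE: the shared fold shape equals pvMsp of the cons list
theorem pv_core (g : Nat → String) (tl : List Nat) (htl : tl.Nodup) (a : String) :
    tl.foldl (fun b q => max b (pvScoreB a (g q) +
        pvMsp ((tl.filter (fun r => !(r == q))).map g))) 0 = pvMsp (a :: tl.map g) := by
  rw [pvMsp_cons, pv_foldl_index tl 0 _ 0]
  simp only [List.length_map]
  apply pv_foldl_congr
  intro b' j hj
  have hj' : j < tl.length := List.mem_range.1 hj
  rw [List.getD_eq_getElem tl 0 hj', pv_filter_ne_eraseIdx tl htl j hj',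
    List.getD_eq_getElem (tl.map g) "" (by simpa using hj'), List.getElem_map,
    List.eraseIdx_map]

-- A-side: the first loop returns the head of the free list (or -1)
theorem pvFindFreeA_eq (l : List String) (vis : List Int) :
    ∀ m k, l.length - k ≤ m →
      pvFindFreeA l vis k =
        (match (List.range' k (l.length - k)).filter (fun i => vis.getD i 0 == 0) with
          | [] => (-1 : Int) | q :: _ => (q : Int)) := by
  intro m
  induction m with
  | zero =>
      intro k h
      have hk : l.length ≤ k := by omega
      have h0 : l.length - k = 0 := by omega
      rw [pvFindFreeA, if_neg (by omega), h0]
      rfl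
  | succ m ih =>
      intro k h
      rw [pvFindFreeA]
      by_cases hk : k < l.length
      · have h1 : l.length - k = (l.length - (k + 1)) + 1 := by omega
        rw [if_pos hk, h1, List.range'_succ, List.filter_cons]
        by_cases hP : (vis.getD k 0 == 0) = true
        · rw [if_pos hP]
          simp only [hP, if_true]
        · rw [if_neg hP]
          simp only [hP, Bool.false_eq_true, if_false]
          exact ih (k + 1) (by omega)
      · have h0 : l.length - k = 0 := by omega
        rw [if_neg hk, h0]
        rfl

-- A-side: the second loop as a fold over the remaining indices
theorem pvLoopA_eq (fuel : Nat) (l : List String) (vis : List Int) (ii : Nat) :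
    ∀ m i, l.length - i ≤ m → ∀ ans,
      pvLoopA fuel l vis ii i ans =
        ((List.range' i (l.length - i)).filter
            (fun q => !(q == ii) && (vis.getD q 0 == 0))).foldl
          (fun b q => max b (pvScoreA (l.getD ii "") (l.getD q "") +
            pvMaxaaGo fuel l ((vis.set ii 1).set q 1))) ans := by
  intro m
  induction m with
  | zero =>
      intro i h ans
      have h0 : l.length - i = 0 := by omega
      rw [pvLoopA, if_neg (by omega), h0]
      rfl
  | succ m ih =>
      intro i h ans
      rw [pvLoopA]
      by_cases hi : i < l.length
      · have h1 : l.length - i = (l.length - (i + 1)) + 1 := by omega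
        rw [if_pos hi, h1, List.range'_succ, List.filter_cons]
        by_cases hc : (!(i == ii) && (vis.getD i 0 == 0)) = true
        · rw [if_pos hc]
          simp only [hc, if_true, List.foldl_cons]
          exact ih (i + 1) (by omega) _
        · rw [if_neg hc]
          simp only [hc, Bool.false_eq_true, if_false]
          exact ih (i + 1) (by omega) ans
      · have h0 : l.length - i = 0 := by omega
        rw [if_neg hi, h0]
        rfl

-- A-side: marking an index visited filters it out of the free list
theorem pvFreeIdx_set (l : List String) (vis : List Int) (k : Nat) (hk : k < vis.length) :
    pvFreeIdx l (vis.set k 1) = (pvFreeIdx l vis).filter (fun r => !(r == k)) := by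
  unfold pvFreeIdx
  rw [List.filter_filter]
  apply List.filter_congr
  intro i _
  by_cases hik : i = k
  · subst hik
    simp [List.getD, List.getElem?_set, hk]
  · simp [List.getD, List.getElem?_set, Ne.symm hik, hik]

-- A-side main invariant
theorem pvA_eq : ∀ (fuel : Nat) (l : List String) (vis : List Int), l.length ≤ vis.length →
    (pvFreeIdx l vis).length < fuel →
    pvMaxaaGo fuel l vis = pvMsp ((pvFreeIdx l vis).map (fun i => l.getD i "")) := by
  intro fuel
  induction fuel with
  | zero => intro l vis _ h; exact absurd h (Nat.not_lt_zero _)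
  | succ fuel ih =>
      intro l vis hpre hlen
      have hfind := pvFindFreeA_eq l vis l.length 0 (by omega)
      rw [Nat.sub_zero, ← List.range_eq_range'] at hfind
      have hndall : (pvFreeIdx l vis).Nodup := List.nodup_range.filter _
      rw [pvMaxaaGo]
      cases hfree : pvFreeIdx l vis with
      | nil =>
          have hfreeR : (List.range l.length).filter (fun i => vis.getD i 0 == 0) = [] := hfree
          rw [hfind, hfreeR]
          simp [pvMsp_nil]
      | cons ii0 tl =>
          have hfreeR : (List.range l.length).filter (fun i => vis.getD i 0 == 0) = ii0 :: tl := hfree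
          rw [hfind, hfreeR]
          have hnd : (ii0 :: tl).Nodup := hfree ▸ hndall
          have hii0tl : ii0 ∉ tl := (List.nodup_cons.1 hnd).1
          have htlnd : tl.Nodup := (List.nodup_cons.1 hnd).2
          have hii0mem : ii0 ∈ pvFreeIdx l vis := by rw [hfree]; exact List.mem_cons_self ..
          have hii0lt : ii0 < l.length := by
            unfold pvFreeIdx at hii0mem
            exact List.mem_range.1 (List.mem_filter.1 hii0mem).1
          have hne : ¬ ((ii0 : Int) == -1) = true := by simp
          rw [if_neg hne]
          have htn : (ii0 : Int).toNat = ii0 := Int.toNat_natCast ii0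
          rw [htn, pvLoopA_eq fuel l vis ii0 l.length 0 (by omega) 0]
          have hsplit : (List.range' 0 (l.length - 0)).filter
              (fun q => !(q == ii0) && (vis.getD q 0 == 0)) = tl := by
            rw [Nat.sub_zero, ← List.range_eq_range', ← List.filter_filter, hfreeR,
              List.filter_cons]
            simp only [beq_self_eq_true, Bool.not_true, Bool.false_eq_true, if_false]
            exact pv_filter_ne_self hii0tl
          rw [hsplit]
          have hterm : ∀ (b : Int) (q : Nat), q ∈ tl →
              (max b (pvScoreA (l.getD ii0 "") (l.getD q "") +
                pvMaxaaGo fuel l ((vis.set ii0 1).set q 1))) =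
              (max b (pvScoreB (l.getD ii0 "") ((fun i => l.getD i "") q) +
                pvMsp ((tl.filter (fun r => !(r == q))).map (fun i => l.getD i "")))) := by
            intro b q hq
            have hqmem : q ∈ pvFreeIdx l vis := by rw [hfree]; exact List.mem_cons_of_mem _ hq
            have hqlt : q < l.length := by
              unfold pvFreeIdx at hqmem
              exact List.mem_range.1 (List.mem_filter.1 hqmem).1
            have hupd : pvFreeIdx l ((vis.set ii0 1).set q 1) = tl.filter (fun r => !(r == q)) := by
              rw [pvFreeIdx_set l (vis.set ii0 1) q (by rw [List.length_set]; omega),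
                pvFreeIdx_set l vis ii0 (by omega), hfree, List.filter_cons]
              simp only [beq_self_eq_true, Bool.not_true, Bool.false_eq_true, if_false]
              rw [pv_filter_ne_self hii0tl]
            have hb2 : (pvFreeIdx l ((vis.set ii0 1).set q 1)).length < fuel := by
              rw [hupd]
              have h1 := List.length_filter_le (fun r => !(r == q)) tl
              have h2 : (ii0 :: tl).length < fuel + 1 := by rw [← hfree]; exact hlen
              simp only [List.length_cons] at h2
              omega
            rw [pv_score_eq,
              ih l ((vis.set ii0 1).set q 1) (by rw [List.length_set, List.length_set]; exact hpre) hb2,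
              hupd]
          rw [pv_foldl_congr tl _ _ 0 hterm,
            pv_core (fun i => l.getD i "") tl htlnd (l.getD ii0 "")]
          simp

-- B-side: the bit-scan loop returns the lowest set bit below n (or n)
theorem pvLowBitB_eq (n mask : Nat) :
    ∀ m k, n - k ≤ m → k ≤ n →
      pvLowBitB n mask k =
        (match (List.range' k (n - k)).filter (fun i => mask.testBit i) with
          | [] => n | q :: _ => q) := by
  intro m
  induction m with
  | zero =>
      intro k h hkn
      have hk : k = n := by omega
      rw [pvLowBitB, hk]
      simp
  | succ m ih =>
      intro k h hkn
      rw [pvLowBitB]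
      by_cases hk : k < n
      · have h1 : n - k = (n - (k + 1)) + 1 := by omega
        rw [h1, List.range'_succ, List.filter_cons]
        by_cases hb : mask.testBit k = true
        · simp only [hb, if_true, Bool.not_true, Bool.and_false, if_false]
          simp
        · simp only [hb, Bool.false_eq_true, if_false, Bool.not_eq_true', Bool.not_false]
          rw [if_pos (by simp [hk, hb])]
          exact ih (k + 1) (by omega) (by omega)
      · have hk' : k = n := by omega
        rw [hk']
        simp

-- B-side: toggling two set bits filters them out of the position list
theorem pvPos_xor (n mask i q : Nat) (hi : mask.testBit i = true) (hq : mask.testBit q = true)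
    (hne : i ≠ q) :
    pvPos n (mask ^^^ (1 <<< i) ^^^ (1 <<< q)) =
      ((pvPos n mask).filter (fun r => !(r == i))).filter (fun r => !(r == q)) := by
  unfold pvPos
  rw [List.filter_filter, List.filter_filter]
  apply List.filter_congr
  intro r _
  rw [Nat.one_shiftLeft, Nat.one_shiftLeft]
  by_cases hri : r = i
  · subst hri
    have h3 : ¬ q = r := fun h => hne h.symm
    simp [Nat.testBit_xor, Nat.testBit_two_pow, hi, h3]
  · by_cases hrq : r = q
    · subst hrq
      have h3 : ¬ i = r := hne
      simp [Nat.testBit_xor, Nat.testBit_two_pow, hq, h3]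
    · have h3 : ¬ i = r := fun h => hri h.symm
      have h4 : ¬ q = r := fun h => hrq h.symm
      simp [Nat.testBit_xor, Nat.testBit_two_pow, h3, h4, hri, hrq]

-- B-side main invariant (memoization is sound w.r.t. pvMsp)
theorem pvB_eq : ∀ (fuel : Nat) (free : List String) (mask : Nat) (memo : PySem.Dict Nat Int),
    pvInv free memo → (pvPos free.length mask).length < fuel →
    (pvSolveB free fuel mask memo).1 =
        pvMsp ((pvPos free.length mask).map (fun i => free.getD i "")) ∧
      pvInv free (pvSolveB free fuel mask memo).2 := by
  intro fuel
  induction fuel with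
  | zero => intro free mask memo _ h; exact absurd h (Nat.not_lt_zero _)
  | succ fuel ih =>
      intro free mask memo hinv hlen
      rw [pvSolveB]
      cases hmem : memo.get? mask with
      | some v =>
          simp only [hmem]
          exact ⟨hinv mask v hmem, hinv⟩
      | none =>
          simp only [hmem]
          have hlow := pvLowBitB_eq free.length mask free.length 0 (by omega) (by omega)
          rw [Nat.sub_zero, ← List.range_eq_range'] at hlow
          cases hpos : pvPos free.length mask with
          | nil =>
              have hposR : (List.range free.length).filter (fun i => mask.testBit i) = [] := hpos
              rw [hlow, hposR]
              constructor
              · simp [pvMsp_nil]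
              · simpa using hinv
          | cons i0 tlp =>
              have hposR : (List.range free.length).filter (fun i => mask.testBit i) = i0 :: tlp := hpos
              rw [hlow, hposR]
              simp only []
              obtain ⟨hbit, -, hi0lt', htlp⟩ := pv_filter_range'_cons (fun i => mask.testBit i)
                free.length 0 i0 tlp (by rw [List.range_eq_range'] at hposR; exact hposR)
              have hi0lt : i0 < free.length := by omega
              rw [if_neg (by omega)]
              have hnd : (i0 :: tlp).Nodup := hpos ▸ (List.nodup_range.filter _)
              have hi0tlp : i0 ∉ tlp := (List.nodup_cons.1 hnd).1
              have htlpnd : tlp.Nodup := (List.nodup_cons.1 hnd).2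
              have hlen' : tlp.length < fuel := by
                have h2 : (i0 :: tlp).length < fuel + 1 := hpos ▸ hlen
                simpa using h2
              have hloop : ∀ m j, free.length - j ≤ m → i0 < j → ∀ (best : Int) memo',
                  pvInv free memo' →
                  (pvLoopB free fuel mask i0 j best memo').1 =
                    ((List.range' j (free.length - j)).filter (fun q => mask.testBit q)).foldl
                      (fun b q => max b (pvScoreB (free.getD i0 "") (free.getD q "") +
                        pvMsp ((tlp.filter (fun r => !(r == q))).map (fun x => free.getD x "")))) best ∧
                  pvInv free (pvLoopB free fuel mask i0 j best memo').2 := by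
                intro m
                induction m with
                | zero =>
                    intro j h hij best memo' hinv'
                    have h0 : free.length - j = 0 := by omega
                    rw [pvLoopB, if_neg (by omega), h0]
                    exact ⟨rfl, hinv'⟩
                | succ m ihm =>
                    intro j h hij best memo' hinv'
                    rw [pvLoopB]
                    by_cases hj : j < free.length
                    · have h1 : free.length - j = (free.length - (j + 1)) + 1 := by omega
                      rw [if_pos hj, h1, List.range'_succ, List.filter_cons]
                      by_cases hb : mask.testBit j = true
                      · simp only [hb, if_true]
                        have hxpos : pvPos free.length (mask ^^^ (1 <<< i0) ^^^ (1 <<< j)) =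
                            tlp.filter (fun r => !(r == j)) := by
                          rw [pvPos_xor free.length mask i0 j hbit hb (by omega), hpos,
                            List.filter_cons]
                          simp only [beq_self_eq_true, Bool.not_true, Bool.false_eq_true, if_false]
                          rw [pv_filter_ne_self hi0tlp]
                        have hxlen :
                            (pvPos free.length (mask ^^^ (1 <<< i0) ^^^ (1 <<< j))).length < fuel := by
                          rw [hxpos]
                          exact Nat.lt_of_le_of_lt (List.length_filter_le _ tlp) hlen'
                        obtain ⟨hv, hinv2⟩ :=
                          ih free (mask ^^^ (1 <<< i0) ^^^ (1 <<< j)) memo' hinv' hxlen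
                        rw [hxpos] at hv
                        obtain ⟨hl1, hl2⟩ := ihm (j + 1) (by omega) (by omega)
                          (max best (pvScoreB (free.getD i0 "") (free.getD j "") +
                            (pvSolveB free fuel (mask ^^^ (1 <<< i0) ^^^ (1 <<< j)) memo').1))
                          (pvSolveB free fuel (mask ^^^ (1 <<< i0) ^^^ (1 <<< j)) memo').2 hinv2
                        rw [List.foldl_cons]
                        refine ⟨?_, hl2⟩
                        rw [hl1, hv]
                      · simp only [hb, Bool.false_eq_true, if_false]
                        exact ihm (j + 1) (by omega) (by omega) best memo' hinv'
                    · have h0 : free.length - j = 0 := by omega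
                      rw [if_neg hj, h0]
                      exact ⟨rfl, hinv'⟩
              obtain ⟨hl1, hl2⟩ := hloop (free.length - (i0 + 1)) (i0 + 1) (le_refl _)
                (by omega) 0 memo hinv
              have htlp' : (List.range' (i0 + 1) (free.length - (i0 + 1))).filter
                  (fun q => mask.testBit q) = tlp := by
                have harith : 0 + free.length - (i0 + 1) = free.length - (i0 + 1) := by omega
                rw [htlp, harith]
              rw [htlp'] at hl1
              have hr1 : (pvLoopB free fuel mask i0 (i0 + 1) 0 memo).1 =
                  pvMsp ((i0 :: tlp).map (fun x => free.getD x "")) := by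
                rw [hl1, pv_core (fun x => free.getD x "") tlp htlpnd (free.getD i0 "")]
                simp
              refine ⟨hr1, ?_⟩
              intro mm vv hget
              rw [PySem.Dict.get?_insert] at hget
              by_cases hmm : mm = mask
              · rw [if_pos hmm] at hget
                have hvv : vv = (pvLoopB free fuel mask i0 (i0 + 1) 0 memo).1 :=
                  (Option.some.inj hget).symm
                rw [hvv, hr1, hmm, hpos]
              · rw [if_neg hmm] at hget
                exact hl2 mm vv hget

theorem pv_filterMap_if {α β : Type} (p : α → Bool) (f : α → β) :
    ∀ xs : List α, xs.filterMap (fun i => if p i then some (f i) else none) = (xs.filter p).map f := by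
  intro xs
  induction xs with
  | nil => rfl
  | cons x xs ih =>
      by_cases h : p x = true <;> simp [List.filterMap_cons, List.filter_cons, h, ih]

theorem pv_map_getD_range {α : Type} (xs : List α) (d : α) :
    (List.range xs.length).map (fun i => xs.getD i d) = xs := by
  apply List.ext_getElem
  · simp
  · intro i h1 h2
    simp only [List.getElem_map, List.getElem_range]
    exact List.getD_eq_getElem xs d h2

-- ===== VERDICT (by name: the statement is the Claim_ definition above) =====
theorem maxaa_spec : Claim_equal_maxaa := by
  intro l vis _ hpre
  unfold Spec_maxaa maxaa maxaa_alt
  have hfree : pvFreeB l vis = (pvFreeIdx l vis).map (fun i => l.getD i "") := by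
    unfold pvFreeB pvFreeIdx
    exact pv_filterMap_if _ _ _
  have hA : pvMaxaaGo (l.length + 1) l vis =
      pvMsp ((pvFreeIdx l vis).map (fun i => l.getD i "")) := by
    apply pvA_eq (l.length + 1) l vis hpre
    have := List.length_filter_le (fun i => vis.getD i 0 == 0) (List.range l.length)
    unfold pvFreeIdx
    simp only [List.length_range] at this
    omega
  have hpos : pvPos (pvFreeB l vis).length (2 ^ (pvFreeB l vis).length - 1) =
      List.range (pvFreeB l vis).length := by
    unfold pvPos
    apply List.filter_eq_self.2
    intro a ha
    rw [Nat.testBit_two_pow_sub_one]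
    simpa using List.mem_range.1 ha
  obtain ⟨hv, -⟩ := pvB_eq ((pvFreeB l vis).length + 1) (pvFreeB l vis)
    (2 ^ (pvFreeB l vis).length - 1) PySem.Dict.empty
    (by intro m v h; simp [PySem.Dict.get?_empty] at h)
    (by rw [hpos]; simp)
  rw [hA, hv, hpos, pv_map_getD_range, hfree]
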